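-- pv_equiv track=rewrite | github.com/SAHILBODKHE/RAGs | graph/graph_utils.py | get_related_tables
-- ===== SOURCE A (Python) =====
-- def get_related_tables(graph: dict, start_tables: list[str], depth: int = 2) -> set:
--     """
--     Traverse the schema graph to find all related tables up to a given depth.
--     Useful for pruning only the relevant schema subset for prompting.
--     """
--     visited = set()
--     frontier = set(start_tables)
--
--     for _ in range(depth):
--         next_frontier = set()
--         for table in frontier:
--             if table in graph:
--                 next_frontier.update(graph[table])
--         visited.update(frontier)
--         frontier = next_frontier - visited
--
--     return visited.union(frontier)
-- ===== SOURCE B (Python) =====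
-- def get_related_tables(graph: dict, start_tables: list[str], depth: int = 2) -> set:
--     """Worklist BFS over depth-labeled nodes instead of per-level frontier sets."""
--     visited = set()
--     order = []  # FIFO worklist of (table, distance); order[i:] is the pending queue
--     for t in start_tables:
--         if t not in visited:
--             visited.add(t)
--             order.append((t, 0))
--     i = 0
--     while i < len(order):
--         t, d = order[i]
--         i += 1
--         if d < depth:
--             for nb in graph.get(t, ()):
--                 if nb not in visited:
--                     visited.add(nb)
--                     order.append((nb, d + 1))
--     return visited
-- ===== Notes on version B (the rewrite author's own statement) =====
-- stated objective: alternative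
-- what changed: Replaced the fixed range(depth) level loop with frontier/next-frontier set rebuilding by a single FIFO worklist of depth-labeled nodes that marks each table visited exactly once when enqueued and stops as soon as the worklist empties.
import Mathlib
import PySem

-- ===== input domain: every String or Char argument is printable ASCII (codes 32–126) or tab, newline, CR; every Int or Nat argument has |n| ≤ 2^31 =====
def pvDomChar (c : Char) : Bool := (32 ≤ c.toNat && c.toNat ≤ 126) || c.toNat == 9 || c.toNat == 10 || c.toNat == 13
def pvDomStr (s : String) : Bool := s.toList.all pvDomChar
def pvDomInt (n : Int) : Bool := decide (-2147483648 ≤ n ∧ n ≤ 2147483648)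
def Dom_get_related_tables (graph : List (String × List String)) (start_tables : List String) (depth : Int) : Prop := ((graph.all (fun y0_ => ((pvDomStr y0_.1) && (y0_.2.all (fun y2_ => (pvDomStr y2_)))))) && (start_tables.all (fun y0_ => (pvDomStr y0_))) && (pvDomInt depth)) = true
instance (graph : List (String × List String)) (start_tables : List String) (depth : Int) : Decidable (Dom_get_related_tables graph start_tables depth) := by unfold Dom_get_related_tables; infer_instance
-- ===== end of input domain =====

-- B replaces A's range(depth) level loop over frontier/next-frontier sets by a single FIFO
-- worklist of depth-labeled nodes (each table enqueued at most once); return values proved equal.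

-- ===== PORT A =====
-- A: visited/frontier level sets, one iteration of the body per element of range(depth).
def get_related_tables (graph : List (String × List String)) (start_tables : List String) (depth : Int) : List String :=
  let g := PySem.Dict.mk graph
  let fin := (PySem.List.pyRange 0 depth 1).foldl
    (fun (st : PySem.Set String × PySem.Set String) _ =>
      let next_frontier := st.2.foldl
        (fun nf table =>
          if g.contains table then PySem.Set.update nf (g.getD table []) else nf)
        PySem.Set.empty
      let visited := PySem.Set.union st.1 st.2
      (visited, PySem.Set.diff next_frontier visited))
    (PySem.Set.empty, PySem.Set.ofList start_tables)
  PySem.Set.union fin.1 fin.2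

-- ===== PORT B =====
-- the seeding loop and the inner neighbor loop of Source B: scan `nbs`, skip seen tables,
-- otherwise add to `visited` and emit a queue entry at distance d1 (in order)
def pvAddNew (visited : PySem.Set String) (d1 : Int) : List String → PySem.Set String × List (String × Int)
  | [] => (visited, [])
  | nb :: rest =>
    if PySem.Set.contains visited nb then pvAddNew visited d1 rest
    else
      let p := pvAddNew (PySem.Set.add visited nb) d1 rest
      (p.1, (nb, d1) :: p.2)

-- one fresh table removed: the count of not-yet-visited occurrences in univ strictly drops
theorem pv_filter_drop (v : List String) (nb : String) :
    ∀ univ : List String, nb ∈ univ → nb ∉ v →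
      (univ.filter (fun x => !decide (x ∈ v ++ [nb]))).length + 1
        ≤ (univ.filter (fun x => !decide (x ∈ v))).length := by
  intro univ
  induction univ with
  | nil => simp
  | cons u us ih =>
    intro hnb hnv
    have hle : (us.filter (fun x => !decide (x ∈ v ++ [nb]))).length
        ≤ (us.filter (fun x => !decide (x ∈ v))).length := by
      rw [← List.countP_eq_length_filter, ← List.countP_eq_length_filter]
      refine List.countP_mono_left (fun x _ hx => ?_)
      simp only [Bool.not_eq_true', decide_eq_false_iff_not, List.mem_append,
        List.mem_singleton] at hx ⊢
      exact fun hm => hx (Or.inl hm)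
    simp only [List.filter_cons]
    by_cases hun : u = nb
    · subst hun
      split_ifs with h1 h2 h3
      · simp at h1
      · simp at h1
      · simp only [List.length_cons]
        omega
      · simp only [Bool.not_eq_true', decide_eq_false_iff_not, not_not] at h3
        exact absurd h3 hnv
    · have hnb' : nb ∈ us := by
        rcases List.mem_cons.mp hnb with h | h
        · exact absurd h.symm hun
        · exact h
      have := ih hnb' hnv
      have hiff : (!decide (u ∈ v ++ [nb])) = (!decide (u ∈ v)) := by
        simp [List.mem_append, hun]
      rw [hiff]
      split_ifs with hcond
      · simp only [List.length_cons]
        omega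
      · omega

-- every table pvAddNew adds was fresh, so the count of not-yet-visited occurrences of `univ`
-- drops by at least the number of emitted queue entries (used only for pvGo's termination)
theorem pvAddNew_measure (univ : List String) (nbs : List String) (d1 : Int) :
    ∀ visited : PySem.Set String, (∀ x ∈ nbs, x ∈ univ) →
      (univ.filter (fun x => !decide (x ∈ (pvAddNew visited d1 nbs).1))).length
        + (pvAddNew visited d1 nbs).2.length
      ≤ (univ.filter (fun x => !decide (x ∈ visited))).length := by
  induction nbs with
  | nil =>
    intro v _
    simp only [pvAddNew]
    exact le_rfl
  | cons nb rest ih =>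
    intro v h
    by_cases hc : PySem.Set.contains v nb = true
    · rw [pvAddNew, if_pos hc]
      exact ih v (fun x hx => h x (List.mem_cons_of_mem _ hx))
    · rw [pvAddNew, if_neg hc]
      have hvnb : nb ∉ (v : List String) := by
        simpa [PySem.Set.contains, List.contains_iff_mem] using hc
      have hadd : PySem.Set.add v nb = v ++ [nb] := by
        simp only [PySem.Set.add]
        rw [if_neg hc]
      rw [hadd]
      have ih' := ih (v ++ [nb]) (fun x hx => h x (List.mem_cons_of_mem _ hx))
      have hdrop := pv_filter_drop v nb univ (h nb List.mem_cons_self) hvnb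
      simp only [List.length_cons]
      omega

-- neighbor lists looked up in the graph are entries of graph.flatMap (·.2)
theorem pvGetD_subset (graph : List (String × List String)) (t : String) :
    ∀ x ∈ (PySem.Dict.mk graph).getD t [], x ∈ graph.flatMap (fun p => p.2) := by
  intro x hx
  simp only [PySem.Dict.getD, PySem.Dict.get?] at hx
  cases hfind : List.find? (fun p => p.1 == t) (PySem.Dict.mk graph).items with
  | none => rw [hfind] at hx; simp at hx
  | some pr =>
    rw [hfind] at hx
    simp at hx
    have hmem : pr ∈ (PySem.Dict.mk graph).items := List.mem_of_find?_eq_some hfind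
    have hgr : (PySem.Dict.mk graph).items = graph := rfl
    rw [hgr] at hmem
    exact List.mem_flatMap.mpr ⟨pr, hmem, by simpa using hx⟩

-- the while-loop of Source B: order[i:] is the queue, one pop per iteration
def pvGo (graph : List (String × List String)) (depth : Int) :
    List (String × Int) → PySem.Set String → PySem.Set String
  | [], visited => visited
  | (t, d) :: rest, visited =>
    if d < depth then
      let p := pvAddNew visited (d + 1) ((PySem.Dict.mk graph).getD t [])
      pvGo graph depth (rest ++ p.2) p.1
    else pvGo graph depth rest visited
termination_by queue visited =>
  ((graph.flatMap (fun p => p.2)).filter (fun x => !decide (x ∈ visited))).length + queue.length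
decreasing_by
  · have := pvAddNew_measure (graph.flatMap (fun p => p.2))
      ((PySem.Dict.mk graph).getD t []) (d + 1) visited (pvGetD_subset graph t)
    simp only [List.length_append, List.length_cons]
    omega
  · simp only [List.length_cons]; omega

def get_related_tables_alt (graph : List (String × List String)) (start_tables : List String) (depth : Int) : List String :=
  let p := pvAddNew PySem.Set.empty 0 start_tables
  pvGo graph depth p.2 p.1

-- ===== PRECONDITION & SPEC =====
def Spec_get_related_tables (graph : List (String × List String)) (start_tables : List String) (depth : Int) (out : List String) : Prop := out = get_related_tables_alt graph start_tables depth
instance (graph : List (String × List String)) (start_tables : List String) (depth : Int) (out : List String) : Decidable (Spec_get_related_tables graph start_tables depth out) := by unfold Spec_get_related_tables; infer_instance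

-- ===== CLAIM (what is proved, stated in full; the proofs are below) =====
def Claim_equal_get_related_tables : Prop := ∀ (graph : List (String × List String)) (start_tables : List String) (depth : Int), Dom_get_related_tables graph start_tables depth → Spec_get_related_tables graph start_tables depth (get_related_tables graph start_tables depth)

-- ===== LEMMAS AND PROOFS =====

-- ---- shared vocabulary of the proof ----

-- the neighbor list both programs read for a table
def pvNbs (graph : List (String × List String)) (t : String) : List String :=
  (PySem.Dict.mk graph).getD t []

-- the sublist of fresh elements a left-to-right insertion of s into set v appends
def pvNew (v : List String) : List String → List String
  | [] => []
  | x :: s => if PySem.Set.contains v x = true then pvNew v s else x :: pvNew (v ++ [x]) s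

-- A's loop body (definitionally the function folded in get_related_tables)
def pvBody (graph : List (String × List String))
    (st : PySem.Set String × PySem.Set String) : PySem.Set String × PySem.Set String :=
  let g := PySem.Dict.mk graph
  let next_frontier := st.2.foldl
    (fun nf table =>
      if g.contains table then PySem.Set.update nf (g.getD table []) else nf)
    PySem.Set.empty
  let visited := PySem.Set.union st.1 st.2
  (visited, PySem.Set.diff next_frontier visited)

-- n applications of A's loop body
def pvAIter (graph : List (String × List String)) :
    Nat → PySem.Set String × PySem.Set String → PySem.Set String × PySem.Set String
  | 0, st => st
  | n + 1, st => pvAIter graph n (pvBody graph st)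

-- the level list B appends while draining one whole frontier F (in order)
def pvLvl (graph : List (String × List String)) (v : List String) : List String → List String
  | [] => []
  | t :: F => pvNew v (pvNbs graph t) ++ pvLvl graph (v ++ pvNew v (pvNbs graph t)) F

-- ---- basic facts about pvNew / Set operations ----

theorem pvUpdate_eq (s : List String) : ∀ v : PySem.Set String,
    PySem.Set.update v s = v ++ pvNew v s := by
  induction s with
  | nil => intro v; simp [PySem.Set.update, pvNew]
  | cons x s ih =>
    intro v
    by_cases hc : PySem.Set.contains v x = true
    · have hadd : PySem.Set.add v x = v := by simp only [PySem.Set.add]; rw [if_pos hc]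
      calc PySem.Set.update v (x :: s) = PySem.Set.update (PySem.Set.add v x) s := rfl
        _ = v ++ pvNew v s := by rw [hadd, ih]
        _ = v ++ pvNew v (x :: s) := by rw [pvNew, if_pos hc]
    · have hadd : PySem.Set.add v x = v ++ [x] := by simp only [PySem.Set.add]; rw [if_neg hc]
      calc PySem.Set.update v (x :: s) = PySem.Set.update (PySem.Set.add v x) s := rfl
        _ = (v ++ [x]) ++ pvNew (v ++ [x]) s := by rw [hadd, ih]
        _ = v ++ pvNew v (x :: s) := by rw [pvNew, if_neg hc]; simp

theorem pvOfList_eq (s : List String) : PySem.Set.ofList s = pvNew [] s := by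
  have := pvUpdate_eq s PySem.Set.empty
  simpa [PySem.Set.update, PySem.Set.ofList, PySem.Set.empty] using this

theorem pvAddNew_eq (d : Int) (s : List String) : ∀ v : PySem.Set String,
    pvAddNew v d s = (v ++ pvNew v s, (pvNew v s).map (fun x => (x, d))) := by
  induction s with
  | nil => intro v; simp [pvAddNew, pvNew]
  | cons x s ih =>
    intro v
    by_cases hc : PySem.Set.contains v x = true
    · rw [pvAddNew, if_pos hc, pvNew, if_pos hc, ih]
    · have hadd : PySem.Set.add v x = v ++ [x] := by simp only [PySem.Set.add]; rw [if_neg hc]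
      rw [pvAddNew, if_neg hc, pvNew, if_neg hc]
      rw [hadd, ih]
      simp

theorem pvNew_append (s t : List String) : ∀ v : List String,
    pvNew v (s ++ t) = pvNew v s ++ pvNew (v ++ pvNew v s) t := by
  induction s with
  | nil =>
    intro v
    rw [List.nil_append, show pvNew v [] = [] from rfl, List.append_nil, List.nil_append]
  | cons x s ih =>
    intro v
    by_cases hc : PySem.Set.contains v x = true
    · rw [List.cons_append, pvNew, if_pos hc, pvNew, if_pos hc, ih]
    · rw [List.cons_append, pvNew, if_neg hc, pvNew, if_neg hc, ih]
      simp

theorem pvNew_nodup (s : List String) : ∀ v : List String, v.Nodup → (v ++ pvNew v s).Nodup := by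
  induction s with
  | nil => intro v hv; simpa [pvNew] using hv
  | cons x s ih =>
    intro v hv
    by_cases hc : PySem.Set.contains v x = true
    · rw [pvNew, if_pos hc]; exact ih v hv
    · have hx : x ∉ v := by simpa [PySem.Set.contains, List.contains_iff_mem] using hc
      rw [pvNew, if_neg hc]
      have hvx : (v ++ [x]).Nodup := by
        simp [List.nodup_append, hv]
        exact fun a ha h => hx (h ▸ ha)
      have := ih (v ++ [x]) hvx
      rw [List.append_cons]
      exact this

theorem pvNew_self (F : List String) : ∀ v : List String, (v ++ F).Nodup → pvNew v F = F := by
  induction F with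
  | nil => intro v _; rfl
  | cons x F ih =>
    intro v hnd
    have hx : x ∉ v := by
      intro hm
      exact (List.disjoint_of_nodup_append hnd) hm List.mem_cons_self
    have hc : ¬ PySem.Set.contains v x = true := by
      simpa [PySem.Set.contains, List.contains_iff_mem] using hx
    rw [pvNew, if_neg hc]
    have hnd' : ((v ++ [x]) ++ F).Nodup := by
      rw [List.append_assoc, List.singleton_append]
      exact hnd
    rw [ih (v ++ [x]) hnd']

-- B's incremental freshness test against visited W equals A's dedup-then-filter
theorem pvNew_filter (s : List String) : ∀ (V W N : List String),
    (∀ x : String, x ∈ V ↔ (x ∈ W ∨ x ∈ N)) →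
    pvNew V s = (pvNew N s).filter (fun x => !W.contains x) := by
  induction s with
  | nil => intro V W N _; rfl
  | cons x s ih =>
    intro V W N hiff
    by_cases hn : x ∈ N
    · have hv : PySem.Set.contains V x = true := by
        simp [PySem.Set.contains, hiff x, hn]
      have hn' : PySem.Set.contains N x = true := by
        simp [PySem.Set.contains, hn]
      rw [show pvNew V (x :: s) = if PySem.Set.contains V x = true then pvNew V s else x :: pvNew (V ++ [x]) s from rfl,
        show pvNew N (x :: s) = if PySem.Set.contains N x = true then pvNew N s else x :: pvNew (N ++ [x]) s from rfl,
        if_pos hv, if_pos hn', ih V W N hiff]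
    · have hn' : ¬ PySem.Set.contains N x = true := by
        simpa [PySem.Set.contains, List.contains_iff_mem] using hn
      rw [show pvNew N (x :: s) = if PySem.Set.contains N x = true then pvNew N s else x :: pvNew (N ++ [x]) s from rfl,
        if_neg hn']
      by_cases hw : x ∈ W
      · have hv : PySem.Set.contains V x = true := by
          simp [PySem.Set.contains, hiff x, hw]
        rw [show pvNew V (x :: s) = if PySem.Set.contains V x = true then pvNew V s else x :: pvNew (V ++ [x]) s from rfl,
          if_pos hv]
        rw [List.filter_cons]
        have hwc : (!W.contains x) = false := by
          simp [hw]
        rw [hwc]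
        simp only [Bool.false_eq_true, if_false]
        refine ih V W (N ++ [x]) (fun y => ?_)
        constructor
        · intro hy
          rcases (hiff y).mp hy with h | h
          · exact Or.inl h
          · exact Or.inr (List.mem_append.mpr (Or.inl h))
        · intro hy
          rcases hy with h | h
          · exact (hiff y).mpr (Or.inl h)
          · rcases List.mem_append.mp h with h' | h'
            · exact (hiff y).mpr (Or.inr h')
            · have : y = x := by simpa using h'
              subst this
              exact (hiff y).mpr (Or.inl hw)
      · have hv : ¬ PySem.Set.contains V x = true := by
          have : x ∉ V := fun hm => by
            rcases (hiff x).mp hm with h | h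
            · exact hw h
            · exact hn h
          simpa [PySem.Set.contains, List.contains_iff_mem] using this
        rw [show pvNew V (x :: s) = if PySem.Set.contains V x = true then pvNew V s else x :: pvNew (V ++ [x]) s from rfl,
          if_neg hv]
        rw [List.filter_cons]
        have hwc : (!W.contains x) = true := by
          simp [hw]
        rw [hwc]
        simp only [if_true]
        rw [ih (V ++ [x]) W (N ++ [x]) (fun y => ?_)]
        constructor
        · intro hy
          rcases List.mem_append.mp hy with h | h
          · rcases (hiff y).mp h with h' | h'
            · exact Or.inl h'
            · exact Or.inr (List.mem_append.mpr (Or.inl h'))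
          · exact Or.inr (List.mem_append.mpr (Or.inr h))
        · intro hy
          rcases hy with h | h
          · exact List.mem_append.mpr (Or.inl ((hiff y).mpr (Or.inl h)))
          · rcases List.mem_append.mp h with h' | h'
            · exact List.mem_append.mpr (Or.inl ((hiff y).mpr (Or.inr h')))
            · exact List.mem_append.mpr (Or.inr h')

-- ---- stepping B's worklist loop ----

theorem pvGo_skip (graph : List (String × List String)) (depth : Int) :
    ∀ (q : List (String × Int)) (v : PySem.Set String),
      (∀ e ∈ q, ¬ e.2 < depth) → pvGo graph depth q v = v := by
  intro q
  induction q with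
  | nil => intro v _; rw [pvGo]
  | cons e rest ih =>
    intro v h
    obtain ⟨t, d⟩ := e
    rw [pvGo, if_neg (h (t, d) List.mem_cons_self)]
    exact ih v (fun e he => h e (List.mem_cons_of_mem _ he))

theorem pvGo_level (graph : List (String × List String)) (depth d : Int) (hd : d < depth) :
    ∀ (F : List String) (G : List String) (v : PySem.Set String),
      pvGo graph depth (F.map (fun t => (t, d)) ++ G.map (fun t => (t, d + 1))) v
        = pvGo graph depth ((G ++ pvLvl graph v F).map (fun t => (t, d + 1)))
            (v ++ pvLvl graph v F) := by
  intro F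
  induction F with
  | nil => intro G v; simp [pvLvl]
  | cons t F ih =>
    intro G v
    rw [List.map_cons, List.cons_append, pvGo, if_pos hd]
    rw [pvAddNew_eq]
    have harr : (F.map (fun t => (t, d)) ++ G.map (fun t => (t, d + 1)))
          ++ (pvNew v (pvNbs graph t)).map (fun x => (x, d + 1))
        = F.map (fun t => (t, d)) ++ (G ++ pvNew v (pvNbs graph t)).map (fun t => (t, d + 1)) := by
      simp
    show pvGo graph depth ((F.map (fun t => (t, d)) ++ G.map (fun t => (t, d + 1)))
        ++ (pvNew v (pvNbs graph t)).map (fun x => (x, d + 1))) (v ++ pvNew v (pvNbs graph t)) = _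
    rw [harr, ih (G ++ pvNew v (pvNbs graph t)) (v ++ pvNew v (pvNbs graph t))]
    rw [pvLvl]
    simp [List.append_assoc]

-- draining a frontier appends exactly the fresh elements of its concatenated neighbor stream
theorem pvLvl_eq (graph : List (String × List String)) :
    ∀ (F : List String) (v : List String),
      pvLvl graph v F = pvNew v (F.flatMap (pvNbs graph)) := by
  intro F
  induction F with
  | nil => intro v; rfl
  | cons t F ih =>
    intro v
    rw [pvLvl, List.flatMap_cons, pvNew_append, ih]

-- ---- A's loop body in pvNew vocabulary ----

theorem pvBody_next (graph : List (String × List String)) :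
    ∀ (F : List String) (N : PySem.Set String),
      F.foldl (fun nf table =>
          if (PySem.Dict.mk graph).contains table
          then PySem.Set.update nf ((PySem.Dict.mk graph).getD table []) else nf) N
        = PySem.Set.update N (F.flatMap (pvNbs graph)) := by
  intro F
  induction F with
  | nil => intro N; rfl
  | cons t F ih =>
    intro N
    rw [List.foldl_cons, List.flatMap_cons]
    by_cases hc : (PySem.Dict.mk graph).contains t = true
    · rw [if_pos hc, ih]
      simp [PySem.Set.update, pvNbs, List.foldl_append]
    · rw [if_neg hc, ih]
      have hnone : (PySem.Dict.mk graph).get? t = none := by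
        rw [PySem.Dict.get?_eq_none_iff_contains]
        simp only [Bool.not_eq_true] at hc
        exact hc
      have : pvNbs graph t = [] := by simp [pvNbs, PySem.Dict.getD, hnone]
      rw [this]
      rfl

theorem pvBody_eq (graph : List (String × List String)) (V F : PySem.Set String) :
    pvBody graph (V, F)
      = (V ++ pvNew V F,
          (pvNew [] (F.flatMap (pvNbs graph))).filter
            (fun x => !(V ++ pvNew V F).contains x)) := by
  show (PySem.Set.union V F,
      PySem.Set.diff
        (F.foldl (fun nf table =>
          if (PySem.Dict.mk graph).contains table
          then PySem.Set.update nf ((PySem.Dict.mk graph).getD table []) else nf)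
          PySem.Set.empty)
        (PySem.Set.union V F)) = _
  rw [pvBody_next]
  have hu : PySem.Set.union V F = V ++ pvNew V F := pvUpdate_eq F V
  have hn : PySem.Set.update PySem.Set.empty (F.flatMap (pvNbs graph))
      = pvNew [] (F.flatMap (pvNbs graph)) := by
    simpa [PySem.Set.empty] using pvUpdate_eq (F.flatMap (pvNbs graph)) PySem.Set.empty
  rw [hu, hn]
  rfl

-- ---- the simulation: B's worklist from a frontier at distance depth - n equals
-- ---- n more iterations of A's level loop ----

theorem pvMain (graph : List (String × List String)) (depth : Int) :
    ∀ (n : Nat) (V F : List String), (V ++ F).Nodup →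
      pvGo graph depth (F.map (fun t => (t, depth - n))) (V ++ F)
        = (pvAIter graph n (V, F)).1
            ++ pvNew (pvAIter graph n (V, F)).1 (pvAIter graph n (V, F)).2 := by
  intro n
  induction n with
  | zero =>
    intro V F hnd
    rw [pvGo_skip graph depth _ _ (by intro e he; simp at he; obtain ⟨t, ht, rfl, rfl⟩ := he; omega)]
    rw [pvAIter]
    rw [pvNew_self F V hnd]
  | succ n ih =>
    intro V F hnd
    have hd : depth - (n + 1 : Nat) < depth := by push_cast; omega
    have hstep := pvGo_level graph depth (depth - (n + 1 : Nat)) hd F [] (V ++ F)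
    have hd1 : depth - (n + 1 : Nat) + 1 = depth - (n : Nat) := by push_cast; ring
    rw [List.map_nil, List.append_nil, List.nil_append] at hstep
    rw [hd1] at hstep
    rw [hstep]
    rw [pvLvl_eq]
    have hVF : V ++ pvNew V F = V ++ F := by rw [pvNew_self F V hnd]
    have hnd2 : ((V ++ F) ++ pvNew (V ++ F) (F.flatMap (pvNbs graph))).Nodup :=
      pvNew_nodup _ _ hnd
    have ih' := ih (V ++ F) (pvNew (V ++ F) (F.flatMap (pvNbs graph))) hnd2
    rw [ih']
    have hbody : pvBody graph (V, F) = (V ++ F, pvNew (V ++ F) (F.flatMap (pvNbs graph))) := by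
      rw [pvBody_eq, hVF]
      congr 1
      exact (pvNew_filter (F.flatMap (pvNbs graph)) (V ++ F) (V ++ F) []
        (fun x => by simp)).symm
    rw [pvAIter, hbody]

-- ---- assembling both ports ----

theorem pvFoldlBody (graph : List (String × List String)) :
    ∀ (l : List Int) (st : PySem.Set String × PySem.Set String),
      List.foldl (fun st (_ : Int) => pvBody graph st) st l = pvAIter graph l.length st := by
  intro l
  induction l with
  | nil => intro st; rfl
  | cons x l ih =>
    intro st
    rw [List.foldl_cons, List.length_cons, pvAIter, ih]

theorem pvA_eq (graph : List (String × List String)) (s : List String) (depth : Int) :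
    get_related_tables graph s depth
      = (fun st : PySem.Set String × PySem.Set String => PySem.Set.union st.1 st.2)
          (pvAIter graph depth.toNat (PySem.Set.empty, PySem.Set.ofList s)) := by
  have h := pvFoldlBody graph (PySem.List.pyRange 0 depth 1) (PySem.Set.empty, PySem.Set.ofList s)
  have h0 : (PySem.List.pyRange 0 depth 1).length = depth.toNat := by
    rw [PySem.List.length_pyRange_one]
    simp
  rw [h0] at h
  calc get_related_tables graph s depth
      = (fun st : PySem.Set String × PySem.Set String => PySem.Set.union st.1 st.2)
          (List.foldl (fun st (_ : Int) => pvBody graph st)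
            (PySem.Set.empty, PySem.Set.ofList s) (PySem.List.pyRange 0 depth 1)) := rfl
    _ = _ := by rw [h]

theorem pvB_eq (graph : List (String × List String)) (s : List String) (depth : Int) :
    get_related_tables_alt graph s depth
      = pvGo graph depth ((pvNew [] s).map (fun x => (x, 0))) (pvNew [] s) := by
  show pvGo graph depth (pvAddNew PySem.Set.empty 0 s).2 (pvAddNew PySem.Set.empty 0 s).1 = _
  rw [pvAddNew_eq]
  rfl

-- ===== VERDICT (by name: the statement is the Claim_ definition above) =====
theorem get_related_tables_spec : Claim_equal_get_related_tables := by
  unfold Claim_equal_get_related_tables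
  intro graph start_tables depth _
  unfold Spec_get_related_tables
  rw [pvA_eq, pvB_eq]
  simp only [PySem.Set.empty, pvOfList_eq]
  have hnd : (([] : List String) ++ pvNew [] start_tables).Nodup := pvNew_nodup _ _ (by simp)
  by_cases hdep : 0 ≤ depth
  · have h0 : depth - (depth.toNat : Int) = 0 := by omega
    have hmain := pvMain graph depth depth.toNat [] (pvNew [] start_tables) hnd
    rw [h0, List.nil_append] at hmain
    rw [hmain]
    simp only [PySem.Set.union]
    exact pvUpdate_eq _ _
  · have htn : depth.toNat = 0 := by omega
    rw [htn]
    rw [pvGo_skip graph depth _ _ (by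
      intro e he
      simp at he
      obtain ⟨t, ht, rfl, rfl⟩ := he
      omega)]
    rw [pvAIter]
    simp only [PySem.Set.union]
    rw [pvUpdate_eq]
    rw [pvNew_self (pvNew [] start_tables) [] (by simpa using hnd)]
    simp
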